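-- pv_equiv track=rewrite | github.com/tranmduc/hust-datn | Algorithm/HedgeAlgebra.py | linguistics
-- ===== SOURCE A (Python) =====
-- def linguistics(h, g, L):
--   def combinations(h, g, L):
--     r = []
--     result = []
--     Len = len(h)
--     for n in range(pow(Len, L)):
--       tmp = ''
--       for i in range(L):
--         tmp = tmp + h[n % Len] + ' '
--         n //= Len
--       tmp = tmp[:-1]
--       r.append(tmp)
--
--     for i in range(len(r)):
--       for j in range(len(g)):
--         tmp = ''
--         tmp = tmp + r[i] + " " + g[j]
--         result.append(tmp)
--     return result
--
--   linguisticValues = g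
--   for i in range(L):
--     linguisticValues = linguisticValues + combinations(h, g, i+1)
--   return linguisticValues
-- ===== SOURCE B (Python) =====
-- def linguistics(h, g, L):
--     out = g
--     level = list(h)
--     for step in range(L):
--         if step > 0:
--             level = [x + ' ' + p for p in level for x in h]
--         out = out + [p + ' ' + gj for p in level for gj in g]
--     return out
-- ===== Notes on version B (the rewrite author's own statement) =====
-- stated objective: simpler
-- what changed: B builds each hedge level incrementally by prepending every hedge to the previous level's sequences (dynamic programming), instead of A's recomputing every length-l sequence from scratch by extracting base-len(h) digits of n with % and // for each n in range(len(h)**l).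
import Mathlib
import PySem

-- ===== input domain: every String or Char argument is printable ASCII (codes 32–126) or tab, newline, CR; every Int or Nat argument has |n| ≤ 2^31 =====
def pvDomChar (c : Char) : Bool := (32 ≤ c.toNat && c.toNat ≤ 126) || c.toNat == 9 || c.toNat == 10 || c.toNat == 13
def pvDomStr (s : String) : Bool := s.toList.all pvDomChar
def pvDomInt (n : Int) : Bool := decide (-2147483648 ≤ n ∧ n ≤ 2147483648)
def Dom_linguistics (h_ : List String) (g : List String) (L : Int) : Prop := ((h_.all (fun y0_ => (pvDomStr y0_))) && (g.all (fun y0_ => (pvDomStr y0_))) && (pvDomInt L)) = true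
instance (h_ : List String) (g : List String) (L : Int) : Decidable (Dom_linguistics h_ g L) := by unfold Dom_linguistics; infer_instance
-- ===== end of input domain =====

-- B builds each level of hedge sequences from the previous one instead of A's
-- per-n digit extraction with % and //; objective: simpler (same enumeration order).

-- ===== PORT A =====
-- strings are handled on the List Char side (PySem convention); tmp[:-1] is PySem.List.slice … (-1)
def linguistics (h_ : List String) (g : List String) (L : Int) : List String :=
  let combinations : Int → List String := fun l =>
    let Len : Int := h_.length
    let r : List (List Char) :=
      (PySem.List.pyRange 0 (Len ^ l.toNat) 1).map (fun n =>
        let st := (PySem.List.pyRange 0 l 1).foldl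
          (fun (st : List Char × Int) _ =>
            (st.1 ++ (PySem.List.pyGetD h_ (PySem.Int.mod st.2 Len) "").toList ++ [' '],
             PySem.Int.floordiv st.2 Len))
          ([], n)
        PySem.List.slice st.1 none (some (-1)))
    r.flatMap (fun ri => g.map (fun gj => String.ofList (ri ++ ' ' :: gj.toList)))
  (PySem.List.pyRange 0 L 1).foldl (fun acc i => acc ++ combinations (i + 1)) g

-- ===== PORT B =====
def linguistics_alt (h_ : List String) (g : List String) (L : Int) : List String :=
  ((PySem.List.pyRange 0 L 1).foldl
    (fun (st : List String × List (List Char)) step =>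
      let level := if step > 0
        then st.2.flatMap (fun p => h_.map (fun x => x.toList ++ ' ' :: p))
        else st.2
      (st.1 ++ level.flatMap (fun p => g.map (fun gj => String.ofList (p ++ ' ' :: gj.toList))),
       level))
    (g, h_.map String.toList)).1

-- ===== PRECONDITION & SPEC =====
def Spec_linguistics (h_ : List String) (g : List String) (L : Int) (out : List String) : Prop := out = linguistics_alt h_ g L
instance (h_ : List String) (g : List String) (L : Int) (out : List String) : Decidable (Spec_linguistics h_ g L out) := by unfold Spec_linguistics; infer_instance

-- ===== CLAIM (what is proved, stated in full; the proofs are below) =====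
def Claim_equal_linguistics : Prop := ∀ (h_ : List String) (g : List String) (L : Int), Dom_linguistics h_ g L → Spec_linguistics h_ g L (linguistics h_ g L)

-- ===== LEMMAS AND PROOFS =====

def pvBody (h_ : List String) (st : List Char × Int) : List Char × Int :=
  (st.1 ++ (PySem.List.pyGetD h_ (PySem.Int.mod st.2 (h_.length : Int)) "").toList ++ [' '],
   PySem.Int.floordiv st.2 (h_.length : Int))
def pvWord (h_ : List String) (l : Nat) (n : Int) : List Char :=
  ((pvBody h_)^[l] ([], n)).1

-- an index-blind foldl is plain iteration
theorem pvFoldl_const {α β : Type} (f : α → α) :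
    ∀ (l : List β) (init : α), l.foldl (fun s _ => f s) init = f^[l.length] init := by
  intro l
  induction l with
  | nil => intro init; rfl
  | cons x xs ih =>
      intro init
      simp [List.foldl_cons, ih, Function.iterate_succ_apply]

theorem pvIter_split (h_ : List String) :
    ∀ (k : Nat) (acc : List Char) (n : Int),
      (pvBody h_)^[k] (acc, n) =
        (acc ++ ((pvBody h_)^[k] ([], n)).1, ((pvBody h_)^[k] ([], n)).2) := by
  intro k
  induction k with
  | zero => intro acc n; simp
  | succ k ih =>
      intro acc n
      rw [Function.iterate_succ_apply, Function.iterate_succ_apply]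
      rw [show pvBody h_ (acc, n) =
            (acc ++ ((pvBody h_ ([], n)).1), (pvBody h_ ([], n)).2) by simp [pvBody]]
      rw [ih, ih ((pvBody h_ ([], n)).1)]
      simp

theorem pvWord_succ (h_ : List String) (l : Nat) (n : Int) :
    pvWord h_ (l+1) n =
      (PySem.List.pyGetD h_ (PySem.Int.mod n (h_.length : Int)) "").toList ++
        ' ' :: pvWord h_ l (PySem.Int.floordiv n (h_.length : Int)) := by
  unfold pvWord
  rw [Function.iterate_succ_apply]
  rw [show pvBody h_ ([], n) =
        ((PySem.List.pyGetD h_ (PySem.Int.mod n (h_.length : Int)) "").toList ++ [' '],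
         PySem.Int.floordiv n (h_.length : Int)) by simp [pvBody]]
  rw [pvIter_split]
  simp

theorem pvWord_ne_nil (h_ : List String) (l : Nat) (n : Int) (hl : 1 ≤ l) :
    pvWord h_ l n ≠ [] := by
  obtain ⟨k, rfl⟩ : ∃ k, l = k + 1 := ⟨l - 1, by omega⟩
  rw [pvWord_succ]
  simp

theorem pvRange_mul (a b : Nat) :
    PySem.List.pyRange 0 ((a : Int) * b) 1 =
      (List.range a).flatMap (fun (m : Nat) => PySem.List.pyRange ((b : Int) * m) ((b : Int) * m + b) 1) := by
  induction a with
  | zero => simp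
  | succ a ih =>
      rw [List.range_succ, List.flatMap_append,
        show (((a:Nat)+1 : Nat) : Int) * b = (a : Int) * b + b by push_cast; ring, ← ih]
      rw [PySem.List.pyRange_one_append 0 ((a:Int)*b) ((a:Int)*b + b) (by positivity) (by omega)]
      simp [mul_comm]

theorem pvRange_block_map {α : Type} (c : Int) (b : Nat) (F : Int → α) :
    (PySem.List.pyRange c (c + b) 1).map F =
      (PySem.List.pyRange 0 (b : Int) 1).map (fun d => F (c + d)) := by
  rw [PySem.List.pyRange_one, PySem.List.pyRange_one]
  simp [List.map_map, Function.comp_def]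

theorem pvMap_pyRange_getD {α : Type} (h_ : List String) (F : String → α) :
    (PySem.List.pyRange 0 (h_.length : Int) 1).map (fun d => F (PySem.List.pyGetD h_ d "")) =
      h_.map F := by
  have h1 := congrArg (List.map F) (PySem.List.map_pyGetD_pyRange_zero' h_ "")
  rw [List.map_map] at h1
  exact h1

def pvWords (h_ : List String) (l : Nat) : List (List Char) :=
  (PySem.List.pyRange 0 ((h_.length : Int) ^ l) 1).map (fun n => (pvWord h_ l n).dropLast)

def pvLevel (h_ : List String) : Nat → List (List Char)
  | 0 => h_.map String.toList
  | k+1 => (pvLevel h_ k).flatMap (fun p => h_.map (fun x => x.toList ++ ' ' :: p))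

theorem pvModDiv (b : Nat) (hb : 0 < b) (m : Nat) (d : Int) (h0 : 0 ≤ d) (h1 : d < b) :
    PySem.Int.mod ((b:Int)*m + d) b = d ∧ PySem.Int.floordiv ((b:Int)*m + d) b = m := by
  rw [PySem.Int.mod_eq_emod_of_pos (show (0:Int) < b by exact_mod_cast hb),
      PySem.Int.floordiv_eq_ediv_of_pos (show (0:Int) < b by exact_mod_cast hb)]
  constructor
  · rw [add_comm, Int.add_mul_emod_self_left]
    exact Int.emod_eq_of_lt h0 h1
  · rw [add_comm, Int.add_mul_ediv_left _ _ (show (b:Int) ≠ 0 by exact_mod_cast hb.ne')]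
    rw [Int.ediv_eq_zero_of_lt h0 h1]; ring

theorem pvLevel_nil : ∀ (l : Nat), pvLevel [] l = [] := by
  intro l; induction l with
  | zero => rfl
  | succ l ih => simp [pvLevel, ih]

theorem pvDropLast_mid (x : List Char) (w : List Char) (h : w ≠ []) :
    (x ++ ' ' :: w).dropLast = x ++ ' ' :: w.dropLast := by
  rw [show x ++ ' ' :: w = (x ++ [' ']) ++ w by simp, List.dropLast_append_of_ne_nil h]
  simp

theorem pvWords_eq_level (h_ : List String) : ∀ (l : Nat), pvWords h_ (l+1) = pvLevel h_ l := by
  intro l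
  rcases Nat.eq_zero_or_pos h_.length with hz | hpos
  · have hnil : h_ = [] := List.eq_nil_of_length_eq_zero hz
    subst hnil
    simp [pvWords, pvLevel_nil]
  · induction l with
    | zero =>
        unfold pvWords pvLevel
        rw [pow_one]
        have hcong : ∀ n ∈ PySem.List.pyRange 0 (h_.length : Int) 1,
            (pvWord h_ 1 n).dropLast = (fun d => (PySem.List.pyGetD h_ d "").toList) n := by
          intro n hn
          rw [PySem.List.mem_pyRange_one] at hn
          rw [show (1:Nat) = 0+1 from rfl, pvWord_succ,
            show pvWord h_ 0 (PySem.Int.floordiv n h_.length) = [] from rfl,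
            PySem.Int.mod_eq_emod_of_pos (show (0:Int) < h_.length by exact_mod_cast hpos),
            Int.emod_eq_of_lt hn.1 hn.2]
          exact List.dropLast_concat
        rw [List.map_congr_left hcong]
        exact pvMap_pyRange_getD h_ String.toList
    | succ l ih =>
        have hblock : ∀ m : Nat,
            (PySem.List.pyRange ((h_.length:Int)*m) ((h_.length:Int)*m + h_.length) 1).map
                (fun n => (pvWord h_ (l+2) n).dropLast) =
              h_.map (fun x => x.toList ++ ' ' :: (pvWord h_ (l+1) m).dropLast) := by
          intro m
          rw [pvRange_block_map]
          have hcong : ∀ d ∈ PySem.List.pyRange 0 (h_.length : Int) 1,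
              (pvWord h_ (l+2) ((h_.length:Int)*m + d)).dropLast =
                (fun x : String => x.toList ++ ' ' :: (pvWord h_ (l+1) m).dropLast)
                  (PySem.List.pyGetD h_ d "") := by
            intro d hd
            rw [PySem.List.mem_pyRange_one] at hd
            obtain ⟨hm, hdv⟩ := pvModDiv h_.length hpos m d hd.1 hd.2
            rw [show l+2 = (l+1)+1 from rfl, pvWord_succ, hm, hdv,
              pvDropLast_mid _ _ (pvWord_ne_nil h_ (l+1) m (by omega))]
          rw [List.map_congr_left hcong]
          exact pvMap_pyRange_getD h_ (fun x => x.toList ++ ' ' :: (pvWord h_ (l+1) m).dropLast)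
        unfold pvWords
        rw [show ((h_.length:Int))^(l+2) = ((h_.length^(l+1) : Nat) : Int) * (h_.length : Int) by
              push_cast; ring]
        rw [pvRange_mul (h_.length^(l+1)) h_.length, List.map_flatMap]
        simp only [hblock]
        show _ = (pvLevel h_ l).flatMap (fun p => h_.map (fun x => x.toList ++ ' ' :: p))
        rw [← ih]
        unfold pvWords
        rw [show ((h_.length:Int))^(l+1) = ((h_.length^(l+1) : Nat) : Int) by push_cast; ring,
          PySem.List.pyRange_zero_nat, List.map_map, List.flatMap_map]
        simp


def pvEmit (g : List String) (lvl : List (List Char)) : List String :=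
  lvl.flatMap (fun p => g.map (fun gj => String.ofList (p ++ ' ' :: gj.toList)))

theorem pvA_eq (h_ g : List String) (L : Int) :
    linguistics h_ g L =
      (PySem.List.pyRange 0 L 1).foldl
        (fun acc i => acc ++ pvEmit g (pvWords h_ (i+1).toNat)) g := by
  unfold linguistics
  dsimp only
  congr 1
  funext acc l
  congr 1
  unfold pvEmit pvWords
  congr 1
  refine List.map_congr_left fun n _ => ?_
  rw [PySem.List.slice_to_neg_one]
  congr 1
  rw [show (fun (st : List Char × Int) (_ : Int) =>
        (st.1 ++ (PySem.List.pyGetD h_ (PySem.Int.mod st.2 (h_.length : Int)) "").toList ++ [' '],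
         PySem.Int.floordiv st.2 (h_.length : Int))) = (fun s _ => pvBody h_ s) from rfl]
  rw [pvFoldl_const (pvBody h_), PySem.List.length_pyRange_one]
  norm_num [pvWord]

theorem pvLoop (h_ g : List String) :
    ∀ (k : Nat) (a : Nat) (_ : 1 ≤ a) (acc : List String),
      (PySem.List.pyRange (a : Int) ((a : Int) + k) 1).foldl
          (fun acc i => acc ++ pvEmit g (pvWords h_ (i+1).toNat)) acc =
        ((PySem.List.pyRange (a : Int) ((a : Int) + k) 1).foldl
          (fun (st : List String × List (List Char)) step =>
            let level := if step > 0
              then st.2.flatMap (fun p => h_.map (fun x => x.toList ++ ' ' :: p))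
              else st.2
            (st.1 ++ level.flatMap (fun p => g.map (fun gj => String.ofList (p ++ ' ' :: gj.toList))),
             level))
          (acc, pvLevel h_ (a-1))).1 := by
  intro k
  induction k with
  | zero =>
      intro a ha acc
      rw [show ((a:Int) + (0:Nat)) = (a:Int) by omega, PySem.List.pyRange_one_eq_nil (le_refl _)]
      rfl
  | succ k ih =>
      intro a ha acc
      rw [PySem.List.pyRange_one_cons (by omega : (a:Int) < (a:Int) + ((k+1 : Nat) : Int))]
      rw [List.foldl_cons, List.foldl_cons]
      have hlvl : (pvLevel h_ (a-1)).flatMap (fun p => h_.map (fun x => x.toList ++ ' ' :: p)) =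
          pvLevel h_ a := by
        rw [show a = (a-1)+1 by omega]
        simp only [Nat.add_sub_cancel]
        rfl
      have hA : pvWords h_ ((a:Int)+1).toNat = pvLevel h_ a := by
        rw [show ((a:Int)+1).toNat = (a-1)+1+1 by omega, pvWords_eq_level,
          show (a-1)+1 = a by omega]
      dsimp only
      rw [if_pos (show ((a:Int) > 0) by exact_mod_cast ha), hlvl, hA]
      have hrange : PySem.List.pyRange ((a:Int)+1) ((a:Int)+((k+1:Nat):Int)) 1 =
          PySem.List.pyRange (((a+1:Nat)):Int) ((((a+1:Nat)):Int)+(k:Int)) 1 := by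
        congr 1
        push_cast
        ring
      rw [hrange]
      have := ih (a+1) (by omega) (acc ++ pvEmit g (pvLevel h_ a))
      rw [show (a+1)-1 = a by omega] at this
      exact this

-- ===== VERDICT (by name: the statement is the Claim_ definition above) =====
theorem linguistics_spec : Claim_equal_linguistics := by
  intro h_ g L _
  unfold Spec_linguistics
  rw [pvA_eq]
  unfold linguistics_alt
  by_cases hL : L ≤ 0
  · rw [PySem.List.pyRange_one_eq_nil hL]
    rfl
  · rw [PySem.List.pyRange_one_cons (by omega : (0:Int) < L), List.foldl_cons, List.foldl_cons]
    dsimp only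
    rw [if_neg (by omega : ¬ ((0:Int) > 0))]
    rw [show ((0:Int)+1).toNat = 0+1 by omega, pvWords_eq_level]
    rw [show PySem.List.pyRange (0+1 : Int) L 1 =
        PySem.List.pyRange ((1:Nat) : Int) (((1:Nat):Int) + (((L-1).toNat : Nat) : Int)) 1 by
      congr 1
      omega]
    exact pvLoop h_ g ((L-1).toNat) 1 (le_refl 1) (g ++ pvEmit g (pvLevel h_ 0))
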